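-- pv_equiv track=rewrite | github.com/soares-leo/MD-EVSP | initializer/utils.py | transform_cp_depot_distances
-- ===== SOURCE A (Python) =====
-- def transform_cp_depot_distances(original_dict):
--     inverse_dict = {}
--
--     for cp, depot_distances in original_dict.items():
--         for depot, distance in depot_distances.items():
--             if depot not in inverse_dict:
--                 inverse_dict[depot] = {}
--             inverse_dict[depot][cp] = distance
--
--     combined_dict = {**original_dict, **inverse_dict}
--
--     return combined_dict
-- ===== SOURCE B (Python) =====
-- def transform_cp_depot_distances(original_dict):
--     depots = list(dict.fromkeys(d for dd in original_dict.values() for d in dd))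
--     inverse_dict = {
--         depot: {cp: dd[depot] for cp, dd in original_dict.items() if depot in dd}
--         for depot in depots
--     }
--     return {**original_dict, **inverse_dict}
-- ===== Notes on version B (the rewrite author's own statement) =====
-- stated objective: alternative
-- what changed: B reverses the loop nesting: it first collects the distinct depots across all inner dicts, then builds each inverse row with a per-depot scan of the cps, instead of A's single cp-major pass that mutates nested dicts in place.
import Mathlib
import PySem

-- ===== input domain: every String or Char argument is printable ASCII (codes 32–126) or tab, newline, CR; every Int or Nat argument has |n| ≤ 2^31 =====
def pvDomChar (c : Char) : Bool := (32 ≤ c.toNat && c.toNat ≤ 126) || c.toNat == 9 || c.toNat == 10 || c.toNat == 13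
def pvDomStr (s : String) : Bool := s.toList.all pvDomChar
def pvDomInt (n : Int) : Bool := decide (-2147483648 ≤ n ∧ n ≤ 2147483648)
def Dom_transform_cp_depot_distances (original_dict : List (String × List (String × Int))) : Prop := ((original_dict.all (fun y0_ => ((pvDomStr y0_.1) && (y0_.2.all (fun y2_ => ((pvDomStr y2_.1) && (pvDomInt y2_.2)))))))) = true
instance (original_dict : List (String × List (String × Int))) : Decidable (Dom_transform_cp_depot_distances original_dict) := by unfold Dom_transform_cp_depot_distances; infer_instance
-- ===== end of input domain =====

-- B inverts the loop nesting: it first collects the depots (ordered dedup of all inner keys), then builds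
-- each inverse row by one scan of the cps per depot, and merges — same values, a different decomposition
-- than A's single forward pass ('alternative'; no speed claim).

-- ===== PORT A =====
def transform_cp_depot_distances (original_dict : List (String × List (String × Int))) : List (String × List (String × Int)) :=
  let inverse_dict : PySem.Dict String (PySem.Dict String Int) :=
    original_dict.foldl (fun inv cpdd =>
      cpdd.2.foldl (fun inv p =>
        let inv := if inv.contains p.1 then inv else inv.insert p.1 PySem.Dict.empty
        inv.insert p.1 ((inv.getD p.1 PySem.Dict.empty).insert cpdd.1 p.2)) inv)
      PySem.Dict.empty
  let combined := inverse_dict.items.foldl (fun d p => d.insert p.1 p.2.items)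
      (PySem.Dict.ofList original_dict)   -- {**original_dict, **inverse_dict}
  combined.items

-- ===== PORT B =====
def transform_cp_depot_distances_alt (original_dict : List (String × List (String × Int))) : List (String × List (String × Int)) :=
  let depots := PySem.List.dedup (original_dict.flatMap (fun cpdd => cpdd.2.map (·.1)))   -- dict.fromkeys(...)
  let inverse_dict : List (String × List (String × Int)) := depots.map (fun depot =>
    -- {cp: dd[depot] for cp, dd in original_dict.items() if depot in dd}: 'if depot in dd' + 'dd[depot]' is get? + map
    (depot, original_dict.filterMap (fun cpdd =>
      ((PySem.Dict.mk cpdd.2).get? depot).map (fun v => (cpdd.1, v)))))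
  ((PySem.Dict.ofList original_dict).update inverse_dict).items   -- {**original_dict, **inverse_dict}

-- ===== PRECONDITION & SPEC =====
-- Pre_ excludes association lists with duplicate outer keys or duplicate keys inside an inner list: such
-- lists cannot arise from Python dicts (the only inputs this function takes), and on them A's last-wins
-- overwrite order is accidental.
def Pre_transform_cp_depot_distances (original_dict : List (String × List (String × Int))) : Prop :=
  (original_dict.map (·.1)).Nodup ∧ ∀ p ∈ original_dict, (p.2.map (·.1)).Nodup
instance (original_dict : List (String × List (String × Int))) : Decidable (Pre_transform_cp_depot_distances original_dict) := by unfold Pre_transform_cp_depot_distances; infer_instance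
def pvWitness_transform_cp_depot_distances : (List (String × List (String × Int))) :=
  [("cp1", [("d1", 3), ("d2", 5)]), ("cp2", [("d1", 7)])]
def Spec_transform_cp_depot_distances (original_dict : List (String × List (String × Int))) (out : List (String × List (String × Int))) : Prop := out = transform_cp_depot_distances_alt original_dict
instance (original_dict : List (String × List (String × Int))) (out : List (String × List (String × Int))) : Decidable (Spec_transform_cp_depot_distances original_dict out) := by unfold Spec_transform_cp_depot_distances; infer_instance

-- ===== CLAIM (what is proved, stated in full; the proofs are below) =====
def Claim_equal_transform_cp_depot_distances : Prop := ∀ (original_dict : List (String × List (String × Int))), Dom_transform_cp_depot_distances original_dict → Pre_transform_cp_depot_distances original_dict → Spec_transform_cp_depot_distances original_dict (transform_cp_depot_distances original_dict)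

-- ===== LEMMAS AND PROOFS =====

-- proof-only abbreviations: A's inverse-building loops in 'modify' form, and the row of cps relevant to one depot
def pvInner (cp : String) (inv : PySem.Dict String (PySem.Dict String Int)) (dd : List (String × Int)) : PySem.Dict String (PySem.Dict String Int) :=
  dd.foldl (fun inv p => inv.modify p.1 PySem.Dict.empty (·.insert cp p.2)) inv

def pvProcess (od : List (String × List (String × Int))) (inv : PySem.Dict String (PySem.Dict String Int)) : PySem.Dict String (PySem.Dict String Int) :=
  od.foldl (fun inv cpdd => pvInner cpdd.1 inv cpdd.2) inv

def pvRelevant (od : List (String × List (String × Int))) (k : String) : List (String × Int) :=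
  od.filterMap (fun cpdd => ((PySem.Dict.mk cpdd.2).get? k).map (fun v => (cpdd.1, v)))

-- A's literal inner step ('ensure key, then set') is a single 'modify'
lemma pvStep_eq (cp : String) (inv : PySem.Dict String (PySem.Dict String Int)) (p : String × Int) :
    (let inv1 := if inv.contains p.1 then inv else inv.insert p.1 PySem.Dict.empty
     inv1.insert p.1 ((inv1.getD p.1 PySem.Dict.empty).insert cp p.2))
      = inv.modify p.1 PySem.Dict.empty (·.insert cp p.2) := by
  show (if inv.contains p.1 then inv else inv.insert p.1 PySem.Dict.empty).insert p.1
        (((if inv.contains p.1 then inv else inv.insert p.1 PySem.Dict.empty).getD p.1 PySem.Dict.empty).insert cp p.2)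
      = _
  by_cases h : inv.contains p.1 = true
  · simp [h, PySem.Dict.modify]
  · simp only [Bool.not_eq_true] at h
    simp [h, PySem.Dict.getD_insert_self, PySem.Dict.insert_insert_self,
      PySem.Dict.getD_of_not_contains, PySem.Dict.modify]

lemma pvProcess_eq_A (od : List (String × List (String × Int))) :
    od.foldl (fun inv cpdd =>
      cpdd.2.foldl (fun inv p =>
        let inv := if inv.contains p.1 then inv else inv.insert p.1 PySem.Dict.empty
        inv.insert p.1 ((inv.getD p.1 PySem.Dict.empty).insert cpdd.1 p.2)) inv)
      PySem.Dict.empty = pvProcess od PySem.Dict.empty := by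
  unfold pvProcess pvInner
  congr 1
  funext inv cpdd
  congr 1
  funext inv p
  exact pvStep_eq cpdd.1 inv p

lemma pvInner_getD (cp : String) (dd : List (String × Int)) (inv : PySem.Dict String (PySem.Dict String Int)) (k : String)
    (h : (dd.map (·.1)).Nodup) :
    (pvInner cp inv dd).getD k PySem.Dict.empty =
      match (PySem.Dict.mk dd).get? k with
      | some v => (inv.getD k PySem.Dict.empty).insert cp v
      | none => inv.getD k PySem.Dict.empty := by
  induction dd generalizing inv with
  | nil => simp [pvInner, PySem.Dict.get?]
  | cons q rest ih =>
    simp only [List.map_cons, List.nodup_cons] at h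
    show (pvInner cp (inv.modify q.1 PySem.Dict.empty (·.insert cp q.2)) rest).getD k PySem.Dict.empty = _
    rw [ih _ h.2]
    rw [PySem.Dict.get?_mk_cons]
    by_cases hk : q.1 = k
    · subst hk
      have hnone : (PySem.Dict.mk rest).get? q.1 = none := by
        rw [PySem.Dict.get?_eq_none_iff_not_mem_keys]
        simpa using h.1
      simp [hnone, PySem.Dict.getD_modify_self]
    · have : (q.1 == k) = false := by simp [hk]
      simp only [this, Bool.false_eq_true, if_false]
      rw [PySem.Dict.getD_modify_of_ne]
      exact fun hh => hk hh.symm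

lemma pvProcess_getD (od : List (String × List (String × Int))) (inv : PySem.Dict String (PySem.Dict String Int)) (k : String)
    (h : ∀ p ∈ od, (p.2.map (·.1)).Nodup) :
    (pvProcess od inv).getD k PySem.Dict.empty =
      (pvRelevant od k).foldl (fun dk q => dk.insert q.1 q.2) (inv.getD k PySem.Dict.empty) := by
  induction od generalizing inv with
  | nil => simp [pvProcess, pvRelevant]
  | cons e rest ih =>
    show (pvProcess rest (pvInner e.1 inv e.2)).getD k PySem.Dict.empty = _
    rw [ih _ (fun p hp => h p (List.mem_cons_of_mem _ hp))]
    rw [pvInner_getD _ _ _ _ (h e (List.mem_cons_self ..))]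
    show _ = ((e :: rest).filterMap _).foldl _ _
    rw [List.filterMap_cons]
    cases hg : (PySem.Dict.mk e.2).get? k <;> simp [pvRelevant]

lemma pvProcess_keys (od : List (String × List (String × Int))) (inv : PySem.Dict String (PySem.Dict String Int)) :
    (pvProcess od inv).keys = PySem.Set.update inv.keys (od.flatMap (fun cpdd => cpdd.2.map (·.1))) := by
  induction od generalizing inv with
  | nil => simp [pvProcess, PySem.Set.update]
  | cons e rest ih =>
    show (pvProcess rest (pvInner e.1 inv e.2)).keys = _
    rw [ih]
    have hkin : (pvInner e.1 inv e.2).keys = PySem.Set.update inv.keys (e.2.map (·.1)) := by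
      have := PySem.Dict.keys_foldl_modify_key (l := e.2) (key := fun p => p.1)
        (d0 := PySem.Dict.empty) (f := fun _ p => (·.insert e.1 p.2)) (d := inv)
      simpa [pvInner] using this
    rw [hkin, List.flatMap_cons]
    simp [PySem.Set.update, List.foldl_append]

lemma pvProcess_nodup (od : List (String × List (String × Int))) (inv : PySem.Dict String (PySem.Dict String Int))
    (h : inv.keys.Nodup) : (pvProcess od inv).keys.Nodup := by
  induction od generalizing inv with
  | nil => exact h
  | cons e rest ih =>
    refine ih _ ?_
    exact PySem.Dict.nodup_keys_foldl_modify_key e.2 (fun p => p.1) PySem.Dict.empty (fun _ p => (·.insert e.1 p.2)) inv h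

lemma pvRelevant_keys_nodup (od : List (String × List (String × Int))) (k : String)
    (h : (od.map (·.1)).Nodup) : ((pvRelevant od k).map (·.1)).Nodup := by
  have hsub : ∀ od' : List (String × List (String × Int)), ((pvRelevant od' k).map (·.1)).Sublist (od'.map (·.1)) := by
    intro od'
    induction od' with
    | nil => simp [pvRelevant]
    | cons e rest ih =>
      rw [pvRelevant, List.filterMap_cons]
      cases hg : (PySem.Dict.mk e.2).get? k
      · exact ih.cons _
      · simpa [pvRelevant] using ih.cons₂ e.1
  exact (hsub od).nodup h

lemma pvMain (od : List (String × List (String × Int)))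
    (h1 : (od.map (·.1)).Nodup) (h2 : ∀ p ∈ od, (p.2.map (·.1)).Nodup) :
    transform_cp_depot_distances od = transform_cp_depot_distances_alt od := by
  unfold transform_cp_depot_distances transform_cp_depot_distances_alt
  simp only
  rw [pvProcess_eq_A]
  have hnd : (pvProcess od PySem.Dict.empty).keys.Nodup :=
    pvProcess_nodup od _ (by simp [PySem.Dict.empty])
  have hmap : (pvProcess od PySem.Dict.empty).items.map (fun p => (p.1, p.2.items))
      = (PySem.List.dedup (od.flatMap (fun cpdd => cpdd.2.map (·.1)))).map (fun depot =>
          (depot, od.filterMap (fun cpdd => ((PySem.Dict.mk cpdd.2).get? depot).map (fun v => (cpdd.1, v))))) := by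
    rw [PySem.Dict.items_eq_map_keys _ hnd PySem.Dict.empty]
    rw [pvProcess_keys]
    have hdep : PySem.Set.update (PySem.Dict.empty : PySem.Dict String (PySem.Dict String Int)).keys
        (od.flatMap (fun cpdd => cpdd.2.map (·.1)))
        = PySem.List.dedup (od.flatMap (fun cpdd => cpdd.2.map (·.1))) := by
      simp [pysem, PySem.Set.update, PySem.Set.ofList_eq_foldl]
    rw [hdep, List.map_map]
    refine List.map_congr_left ?_
    intro k hk
    simp only [Function.comp]
    congr 1
    rw [pvProcess_getD od _ k h2]
    simp only [PySem.Dict.getD_empty]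
    have hfresh := PySem.Dict.items_foldl_insert_fresh (l := pvRelevant od k)
      (k := fun q => q.1) (v := fun q => q.2) (d := (PySem.Dict.empty : PySem.Dict String (PySem.Dict String Int)).getD k PySem.Dict.empty)
      (by simp [PySem.Dict.getD_empty, PySem.Dict.contains_empty]) (pvRelevant_keys_nodup od k h1)
    simp only [PySem.Dict.getD_empty] at hfresh ⊢
    rw [hfresh]
    simp [pvRelevant, PySem.Dict.empty]
  have hfold : (pvProcess od PySem.Dict.empty).items.foldl (fun d p => d.insert p.1 p.2.items) (PySem.Dict.ofList od)
      = ((pvProcess od PySem.Dict.empty).items.map (fun p => (p.1, p.2.items))).foldl (fun d q => d.insert q.1 q.2) (PySem.Dict.ofList od) := by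
    rw [List.foldl_map]
  rw [hfold, hmap]
  rfl

-- ===== VERDICT (by name: the statement is the Claim_ definition above) =====
theorem transform_cp_depot_distances_spec : Claim_equal_transform_cp_depot_distances := by
  intro od _hdom hpre
  exact pvMain od hpre.1 hpre.2
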